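-- pv_equiv track=rewrite | github.com/Parmeshwargupta/web_scrapping | python_begins/pattern/pattern8.py | pattern
-- ===== SOURCE A (Python) =====
-- def pattern(n):
--     res = []
--     for i in range(n):
--         ans = ''
--         for j in range(i+1):
--             if j == 0 or i == j:
--                 ans = ans + "1"
--             else:
--                 ans = ans + "2"
--         res.append(ans)
--     return res
-- ===== SOURCE B (Python) =====
-- def pattern(n):
--     res = []
--     for i in range(n):
--         if i == 0:
--             res.append("1")
--         else:
--             res.append("1" + "2" * (i - 1) + "1")
--     return res
-- ===== Notes on version B (the rewrite author's own statement) =====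
-- stated objective: faster
-- what changed: Replaces the inner character-by-character loop (edge/interior branch per character) with a closed-form row string "1" + "2"*(i-1) + "1" ("1" for row 0), avoiding per-character string concatenation.
import Mathlib
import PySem

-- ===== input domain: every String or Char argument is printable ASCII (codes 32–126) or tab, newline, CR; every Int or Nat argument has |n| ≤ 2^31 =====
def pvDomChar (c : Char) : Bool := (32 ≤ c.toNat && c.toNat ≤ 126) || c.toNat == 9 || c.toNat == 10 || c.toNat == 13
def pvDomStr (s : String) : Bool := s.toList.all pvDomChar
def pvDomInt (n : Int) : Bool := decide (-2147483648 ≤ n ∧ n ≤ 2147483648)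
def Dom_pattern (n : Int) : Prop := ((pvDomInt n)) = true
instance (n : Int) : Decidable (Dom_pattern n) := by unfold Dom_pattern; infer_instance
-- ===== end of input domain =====

-- B builds each row by the closed form "1" + "2"*(i-1) + "1" instead of A's
-- character-by-character inner loop (objective: simpler).

-- ===== PORT A =====
def pattern (n : Int) : List String :=
  (PySem.List.pyRange 0 n 1).foldl
    (fun res i =>
      res ++ [(PySem.List.pyRange 0 (i + 1) 1).foldl
        (fun ans j => ans ++ (if j == 0 || i == j then "1" else "2")) ""])
    []

-- ===== PORT B =====
def pattern_alt (n : Int) : List String :=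
  (PySem.List.pyRange 0 n 1).foldl
    (fun res i =>
      res ++ [if i == 0 then "1"
              else "1" ++ String.ofList (List.replicate (i - 1).toNat '2') ++ "1"])
    []

-- ===== PRECONDITION & SPEC =====
def Spec_pattern (n : Int) (out : List String) : Prop := out = pattern_alt n
instance (n : Int) (out : List String) : Decidable (Spec_pattern n out) := by unfold Spec_pattern; infer_instance

-- ===== CLAIM (what is proved, stated in full; the proofs are below) =====
def Claim_equal_pattern : Prop := ∀ (n : Int), Dom_pattern n → Spec_pattern n (pattern n)

-- ===== LEMMAS AND PROOFS =====

-- middle+end of A's inner loop: for 1 ≤ a ≤ i, the fold over [a, i+1) appends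
-- (i-a) copies of '2' and a final '1'
lemma pattern_inner_mid (i : Int) :
    ∀ (m : Nat) (a : Int), 1 ≤ a → a ≤ i → (i - a).toNat = m → ∀ (ans : String),
      (PySem.List.pyRange a (i + 1) 1).foldl
        (fun ans j => ans ++ (if j == 0 || i == j then "1" else "2")) ans
      = ans ++ String.ofList (List.replicate m '2') ++ "1" := by
  intro m
  induction m with
  | zero =>
    intro a h1 h2 hm ans
    have hai : a = i := by omega
    subst hai
    rw [PySem.List.pyRange_one_cons (by omega), PySem.List.pyRange_one_eq_nil (by omega)]
    simp only [List.foldl_cons, List.foldl_nil, beq_self_eq_true, Bool.or_true]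
    have he : String.ofList ([] : List Char) = "" := rfl
    simp [he]
  | succ k ih =>
    intro a h1 h2 hm ans
    rw [PySem.List.pyRange_one_cons (by omega)]
    simp only [List.foldl_cons]
    have h0 : (a == (0 : Int)) = false := by simp; omega
    have h1' : (i == a) = false := by simp; omega
    rw [h0, h1']
    rw [ih (a + 1) (by omega) (by omega) (by omega)]
    apply congrArg (· ++ "1")
    norm_num
    rw [List.replicate_succ, show "2" = String.ofList ['2'] from rfl,
      String.append_assoc, ← String.ofList_append]
    rfl

-- A's inner loop at row i (0 ≤ i) equals B's closed-form row
lemma pattern_row (i : Int) (hi : 0 ≤ i) :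
    (PySem.List.pyRange 0 (i + 1) 1).foldl
      (fun ans j => ans ++ (if j == 0 || i == j then "1" else "2")) ""
    = (if i == 0 then "1"
       else "1" ++ String.ofList (List.replicate (i - 1).toNat '2') ++ "1") := by
  by_cases h0 : i = 0
  · subst h0
    rw [PySem.List.pyRange_one_cons (by omega), PySem.List.pyRange_one_eq_nil (by omega)]
    simp
  · have hi1 : 1 ≤ i := by omega
    rw [PySem.List.pyRange_one_cons (by omega)]
    simp only [List.foldl_cons]
    have hz : ((0 : Int) == 0) = true := by simp
    rw [hz]
    simp only [Bool.true_or]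
    have h01 : (0 : Int) + 1 = 1 := rfl
    rw [h01, pattern_inner_mid i (i - 1).toNat 1 (by omega) (by omega) (by omega)]
    have : (i == (0 : Int)) = false := by simp; omega
    rw [this]
    simp

-- ===== VERDICT (by name: the statement is the Claim_ definition above) =====
theorem pattern_spec : Claim_equal_pattern := by
  intro n _
  unfold Spec_pattern pattern pattern_alt
  apply PySem.List.foldl_congr_mem
  intro acc i hmem
  have hi : 0 ≤ i := (PySem.List.mem_pyRange_one.mp hmem).1
  rw [pattern_row i hi]
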